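-- pv_equiv track=rewrite | github.com/earthai-tech/fusionlab-learn | fusionlab/tools/app/geoprior/ui/map/analytics_panel.py | pick_id_col
-- ===== SOURCE A (Python) =====
-- from typing import Optional, Sequence
--
-- def pick_id_col(cols: Sequence[str]) -> str:
--     cand = [str(c) for c in (cols or [])]
--     for name in (
--         "sample_idx",
--         "sid",
--         "point_id",
--         "site_id",
--         "id",
--     ):
--         if name in cand:
--             return name
--     return ""
-- ===== SOURCE B (Python) =====
-- _RANK = {"sample_idx": 0, "sid": 1, "point_id": 2, "site_id": 3, "id": 4}
-- _NAMES = ("sample_idx", "sid", "point_id", "site_id", "id")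
--
-- def pick_id_col(cols):
--     best = 5
--     for c in (cols or []):
--         r = _RANK.get(str(c), 5)
--         if r < best:
--             best = r
--     return _NAMES[best] if best < 5 else ""
-- ===== Notes on version B (the rewrite author's own statement) =====
-- stated objective: alternative
-- what changed: Instead of scanning the whole column list once per candidate name (membership test per candidate), B makes a single pass over the columns, looking each column up in a fixed rank dictionary and keeping the smallest rank seen; the best rank indexes the candidate tuple at the end.
import Mathlib
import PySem

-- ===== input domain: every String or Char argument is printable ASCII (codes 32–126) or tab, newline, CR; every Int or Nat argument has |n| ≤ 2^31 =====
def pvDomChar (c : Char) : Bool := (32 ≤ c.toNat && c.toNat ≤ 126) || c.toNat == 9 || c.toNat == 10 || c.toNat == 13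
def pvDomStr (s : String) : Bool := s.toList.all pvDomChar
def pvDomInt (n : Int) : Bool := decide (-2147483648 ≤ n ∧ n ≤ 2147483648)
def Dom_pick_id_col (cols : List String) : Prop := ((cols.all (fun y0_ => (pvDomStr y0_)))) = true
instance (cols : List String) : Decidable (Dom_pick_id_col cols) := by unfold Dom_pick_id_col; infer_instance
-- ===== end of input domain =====

-- B replaces A's per-candidate membership scans by one pass over the columns with a rank-dictionary lookup (objective: alternative decomposition).

-- ===== PORT A =====
-- cand = [str(c) for c in (cols or [])]: str on a str is the identity, '[] or []' = []
-- the 'for name in (…): if name in cand: return name' loop over the 5-tuple literal is the early-return chain below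
def pick_id_col (cols : List String) : String :=
  let cand := cols.map (fun c => c)
  if cand.contains "sample_idx" then "sample_idx"
  else if cand.contains "sid" then "sid"
  else if cand.contains "point_id" then "point_id"
  else if cand.contains "site_id" then "site_id"
  else if cand.contains "id" then "id"
  else ""

-- ===== PORT B =====
def pvRankB : PySem.Dict String Int :=
  PySem.Dict.ofList [("sample_idx", 0), ("sid", 1), ("point_id", 2), ("site_id", 3), ("id", 4)]

def pvNamesB : List String := ["sample_idx", "sid", "point_id", "site_id", "id"]

-- single pass over cols keeping the smallest rank; _NAMES[best] is a tuple index,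
-- in range whenever best < 5, so pyGetD's default is never consulted
def pick_id_col_alt (cols : List String) : String :=
  let best := cols.foldl (fun b c => let r := PySem.Dict.getD pvRankB c 5; if r < b then r else b) (5 : Int)
  if best < 5 then PySem.List.pyGetD pvNamesB best "" else ""

-- ===== PRECONDITION & SPEC =====
def Spec_pick_id_col (cols : List String) (out : String) : Prop := out = pick_id_col_alt cols
instance (cols : List String) (out : String) : Decidable (Spec_pick_id_col cols out) := by unfold Spec_pick_id_col; infer_instance

-- ===== CLAIM (what is proved, stated in full; the proofs are below) =====
def Claim_equal_pick_id_col : Prop := ∀ (cols : List String), Dom_pick_id_col cols → Spec_pick_id_col cols (pick_id_col cols)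

-- ===== LEMMAS AND PROOFS =====

-- rank of one column name, as B's dict lookup computes it
def pvR (c : String) : Int := PySem.Dict.getD pvRankB c 5

lemma pvR_items : pvRankB.items =
    [("sample_idx", (0:Int)), ("sid", 1), ("point_id", 2), ("site_id", 3), ("id", 4)] := by decide

lemma pvR_eq (c : String) :
    pvR c = if c = "sample_idx" then 0 else if c = "sid" then 1 else if c = "point_id" then 2
      else if c = "site_id" then 3 else if c = "id" then 4 else 5 := by
  by_cases h0 : c = "sample_idx"
  · subst h0; decide
  by_cases h1 : c = "sid"
  · subst h1; decide
  by_cases h2 : c = "point_id"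
  · subst h2; decide
  by_cases h3 : c = "site_id"
  · subst h3; decide
  by_cases h4 : c = "id"
  · subst h4; decide
  have e0 : ("sample_idx" == c) = false := by rw [beq_eq_false_iff_ne]; exact fun e => h0 e.symm
  have e1 : ("sid" == c) = false := by rw [beq_eq_false_iff_ne]; exact fun e => h1 e.symm
  have e2 : ("point_id" == c) = false := by rw [beq_eq_false_iff_ne]; exact fun e => h2 e.symm
  have e3 : ("site_id" == c) = false := by rw [beq_eq_false_iff_ne]; exact fun e => h3 e.symm
  have e4 : ("id" == c) = false := by rw [beq_eq_false_iff_ne]; exact fun e => h4 e.symm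
  unfold pvR
  simp only [PySem.Dict.getD, PySem.Dict.get?, pvR_items, List.find?_cons, List.find?_nil,
    e0, e1, e2, e3, e4]
  simp [h0, h1, h2, h3, h4]

-- B's fold over the whole list, as a function of the start accumulator
def pvBest (cols : List String) : Int :=
  cols.foldl (fun b c => if pvR c < b then pvR c else b) 5

lemma pvR_le_five (c : String) : 0 ≤ pvR c ∧ pvR c ≤ 5 := by
  rw [pvR_eq]; split_ifs <;> omega

lemma foldl_min_eq (cols : List String) (b : Int) (hb : b ≤ 5) :
    cols.foldl (fun b c => if pvR c < b then pvR c else b) b = min b (pvBest cols) := by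
  induction cols generalizing b with
  | nil => simp [pvBest]; omega
  | cons c cs ih =>
      have hr := pvR_le_five c
      show cs.foldl _ (if pvR c < b then pvR c else b) = _
      rw [ih _ (by split_ifs <;> omega)]
      have h5 : pvBest (c :: cs) = min (if pvR c < 5 then pvR c else 5) (pvBest cs) := by
        show cs.foldl _ (if pvR c < 5 then pvR c else 5) = _
        rw [ih _ (by split_ifs <;> omega)]
      rw [h5]; split_ifs <;> omega

lemma pvBest_bounds (cols : List String) : 0 ≤ pvBest cols ∧ pvBest cols ≤ 5 := by
  induction cols with
  | nil => norm_num [pvBest]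
  | cons x xs ih =>
      have hr := pvR_le_five x
      have hx : pvBest (x :: xs) = min (if pvR x < 5 then pvR x else 5) (pvBest xs) := by
        show xs.foldl _ (if pvR x < 5 then pvR x else 5) = _
        rw [foldl_min_eq _ _ (by split_ifs <;> omega)]
      rw [hx]; split_ifs <;> omega

lemma pvBest_le_of_mem {c : String} {cols : List String} (h : c ∈ cols) :
    pvBest cols ≤ pvR c := by
  induction cols with
  | nil => cases h
  | cons x xs ih =>
      have hr := pvR_le_five x
      have hbx := pvBest_bounds xs
      have hx : pvBest (x :: xs) = min (if pvR x < 5 then pvR x else 5) (pvBest xs) := by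
        show xs.foldl _ (if pvR x < 5 then pvR x else 5) = _
        rw [foldl_min_eq _ _ (by split_ifs <;> omega)]
      rcases List.mem_cons.mp h with rfl | h
      · rw [hx]; split_ifs <;> omega
      · rw [hx]; have := ih h; split_ifs <;> omega

lemma pvBest_attained (cols : List String) :
    pvBest cols = 5 ∨ ∃ c ∈ cols, pvBest cols = pvR c := by
  induction cols with
  | nil => left; rfl
  | cons x xs ih =>
      have hr := pvR_le_five x
      have hx : pvBest (x :: xs) = min (if pvR x < 5 then pvR x else 5) (pvBest xs) := by
        show xs.foldl _ (if pvR x < 5 then pvR x else 5) = _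
        rw [foldl_min_eq _ _ (by split_ifs <;> omega)]
      rcases ih with h5 | ⟨c, hc, hv⟩
      · by_cases hlt : pvR x < 5
        · right; exact ⟨x, List.mem_cons_self, by rw [hx, h5]; split_ifs <;> omega⟩
        · left; rw [hx, h5]; split_ifs <;> omega
      · by_cases hlt : pvR x < pvBest xs
        · right; exact ⟨x, List.mem_cons_self, by rw [hx]; split_ifs <;> omega⟩
        · right; exact ⟨c, List.mem_cons.mpr (Or.inr hc), by rw [hx, hv]; rw [hv] at hlt; split_ifs <;> omega⟩

lemma pvR_inj {c : String} {k : Int} (hk : k < 5) (h : pvR c = k) :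
    c = (if k = 0 then "sample_idx" else if k = 1 then "sid" else if k = 2 then "point_id"
      else if k = 3 then "site_id" else "id") := by
  rw [pvR_eq] at h
  split_ifs at h <;> split_ifs <;> first | assumption | omega

-- absence of a candidate name from cols forbids that name's exact rank
lemma pvBest_ne {cols : List String} {name : String} {k : Int}
    (hk : 0 ≤ k ∧ k < 5)
    (hname : name = (if k = 0 then "sample_idx" else if k = 1 then "sid" else if k = 2 then "point_id"
      else if k = 3 then "site_id" else "id"))
    (h : name ∉ cols) : pvBest cols ≠ k := by
  intro hEq
  rcases pvBest_attained cols with h5 | ⟨c, hc, hv⟩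
  · omega
  · have hrc : pvR c = k := hv.symm.trans hEq
    have : c = name := hname ▸ pvR_inj (by omega) hrc
    exact h (this ▸ hc)

-- ===== VERDICT (by name: the statement is the Claim_ definition above) =====
theorem pick_id_col_spec : Claim_equal_pick_id_col := by
  intro cols _
  unfold Spec_pick_id_col pick_id_col pick_id_col_alt
  have hbest : cols.foldl (fun b c => let r := PySem.Dict.getD pvRankB c 5; if r < b then r else b) (5 : Int)
      = pvBest cols := rfl
  rw [hbest]
  simp only [List.map_id']
  have hge := pvBest_bounds cols
  by_cases h0 : "sample_idx" ∈ cols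
  · have hle := pvBest_le_of_mem h0
    rw [pvR_eq] at hle; simp at hle
    have hb : pvBest cols = 0 := by omega
    simp [h0, hb]; decide
  · by_cases h1 : "sid" ∈ cols
    · have hle := pvBest_le_of_mem h1
      rw [pvR_eq] at hle; simp at hle
      have hne0 := pvBest_ne (k := 0) (by omega) (by simp) h0
      have hb : pvBest cols = 1 := by omega
      simp [h0, h1, hb]; decide
    · by_cases h2 : "point_id" ∈ cols
      · have hle := pvBest_le_of_mem h2
        rw [pvR_eq] at hle; simp at hle
        have hne0 := pvBest_ne (k := 0) (by omega) (by simp) h0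
        have hne1 := pvBest_ne (k := 1) (by omega) (by simp) h1
        have hb : pvBest cols = 2 := by omega
        simp [h0, h1, h2, hb]; decide
      · by_cases h3 : "site_id" ∈ cols
        · have hle := pvBest_le_of_mem h3
          rw [pvR_eq] at hle; simp at hle
          have hne0 := pvBest_ne (k := 0) (by omega) (by simp) h0
          have hne1 := pvBest_ne (k := 1) (by omega) (by simp) h1
          have hne2 := pvBest_ne (k := 2) (by omega) (by simp) h2
          have hb : pvBest cols = 3 := by omega
          simp [h0, h1, h2, h3, hb]; decide
        · by_cases h4 : "id" ∈ cols
          · have hle := pvBest_le_of_mem h4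
            rw [pvR_eq] at hle; simp at hle
            have hne0 := pvBest_ne (k := 0) (by omega) (by simp) h0
            have hne1 := pvBest_ne (k := 1) (by omega) (by simp) h1
            have hne2 := pvBest_ne (k := 2) (by omega) (by simp) h2
            have hne3 := pvBest_ne (k := 3) (by omega) (by simp) h3
            have hb : pvBest cols = 4 := by omega
            simp [h0, h1, h2, h3, h4, hb]; decide
          · have hne : ∀ c ∈ cols, pvR c = 5 := by
              intro c hc
              rw [pvR_eq]
              split_ifs with a b c' d e
              · exact absurd (a ▸ hc) h0
              · exact absurd (b ▸ hc) h1
              · exact absurd (c' ▸ hc) h2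
              · exact absurd (d ▸ hc) h3
              · exact absurd (e ▸ hc) h4
              · rfl
            have h5 : pvBest cols = 5 := by
              rcases pvBest_attained cols with h | ⟨c, hc, hv⟩
              · exact h
              · rw [hv, hne c hc]
            simp [h0, h1, h2, h3, h4, h5]
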